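-- pv_equiv track=rewrite | github.com/Mahesh-Ramani/math-portfolio | catalans/narayana/narayana.py | precompute_L_table
-- ===== SOURCE A (Python) =====
-- def precompute_L_table(nmax, primes):
--     L = {}
--     for p in primes:
--         if p > nmax:
--             break
--         arr = [0] * (nmax + 1)
--         for m in range(1, nmax + 1):
--             arr[m] = (m // p) + arr[m // p]
--         L[p] = arr
--     return L
-- ===== SOURCE B (Python) =====
-- def _legendre(m, p):
--     # Legendre's formula: v_p(m!) = sum over k>=1 of m // p**k
--     total = 0
--     pk = p
--     while pk <= m:
--         total += m // pk
--         pk *= p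
--     return total
--
--
-- def precompute_L_table(nmax, primes):
--     L = {}
--     for p in primes:
--         if p > nmax:
--             break
--         L[p] = [_legendre(m, p) for m in range(nmax + 1)]
--     return L
-- ===== Notes on version B (the rewrite author's own statement) =====
-- stated objective: alternative
-- what changed: Each table entry is computed independently by summing m//p^k over the powers of p (Legendre's formula) instead of the dynamic-programming chain arr[m] = m//p + arr[m//p] over a shared array.
-- outside the precondition, e.g. on precompute_L_table(5, [-2]): A returns {-2: [0, -1, -1, -2, -2, -5]}, B returns {-2: [0, -1, -1, -2, -2, -3]}; on precompute_L_table(5, [1]): A returns {1: [0, 1, 2, 3, 4, 5]}, B does not finish within the time limit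
import Mathlib
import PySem

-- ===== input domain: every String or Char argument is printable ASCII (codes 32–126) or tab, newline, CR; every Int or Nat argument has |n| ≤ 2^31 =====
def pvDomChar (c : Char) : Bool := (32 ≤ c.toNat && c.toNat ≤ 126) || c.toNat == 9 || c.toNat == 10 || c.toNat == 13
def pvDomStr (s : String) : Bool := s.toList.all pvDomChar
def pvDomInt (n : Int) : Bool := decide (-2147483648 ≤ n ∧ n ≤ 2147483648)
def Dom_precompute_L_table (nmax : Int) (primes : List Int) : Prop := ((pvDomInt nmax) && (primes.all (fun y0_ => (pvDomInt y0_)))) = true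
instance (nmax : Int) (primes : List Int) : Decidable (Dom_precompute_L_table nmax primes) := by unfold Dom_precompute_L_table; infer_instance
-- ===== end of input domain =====

-- B replaces A's dynamic-programming chain arr[m] = m//p + arr[m//p] by an independent
-- per-entry Legendre summation sum_k m//p^k (objective: alternative, same order of cost).

-- ===== PORT A =====
-- inner loop body: arr[m] = (m // p) + arr[m // p]
def pvStepA (p : Int) (arr : List Int) (m : Int) : List Int :=
  PySem.List.pySetD arr m (PySem.Int.floordiv m p + PySem.List.pyGetD arr (PySem.Int.floordiv m p) 0)

-- the 'for p in primes' loop with its break, accumulating the dict L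
def pvLoopA (nmax : Int) : List Int → PySem.Dict Int (List Int) → PySem.Dict Int (List Int)
  | [], L => L
  | p :: rest, L =>
    if p > nmax then L
    else
      pvLoopA nmax rest
        (L.insert p ((PySem.List.pyRange 1 (nmax + 1) 1).foldl (pvStepA p)
          (List.replicate (nmax + 1).toNat 0)))

def precompute_L_table (nmax : Int) (primes : List Int) : List (Int × List Int) :=
  (pvLoopA nmax primes PySem.Dict.empty).items

-- ===== PORT B =====
-- _legendre(m, p): total = 0; pk = p; while pk <= m: total += m // pk; pk *= p
-- fuel makes the while-loop structural; fuel m.toNat suffices for p ≥ 2 (proved below)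
def pvLegendreGo (fuel : Nat) (m p pk total : Int) : Int :=
  match fuel with
  | 0 => total
  | f + 1 =>
    if pk ≤ m then pvLegendreGo f m p (pk * p) (total + PySem.Int.floordiv m pk)
    else total

def pvLegendre (m p : Int) : Int := pvLegendreGo m.toNat m p p 0

def pvLoopB (nmax : Int) : List Int → PySem.Dict Int (List Int) → PySem.Dict Int (List Int)
  | [], L => L
  | p :: rest, L =>
    if p > nmax then L
    else
      pvLoopB nmax rest
        (L.insert p ((PySem.List.pyRange 0 (nmax + 1) 1).map (fun m => pvLegendre m p)))

def precompute_L_table_alt (nmax : Int) (primes : List Int) : List (Int × List Int) :=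
  (pvLoopB nmax primes PySem.Dict.empty).items

-- ===== PRECONDITION & SPEC =====
-- Pre_ requires the entries the loop actually scans (the prefix of entries ≤ nmax, up to the
-- break) to be genuine prime candidates (≥ 2): on a scanned 0 A raises ZeroDivisionError; on a
-- scanned negative entry A's values come from negative-index wraparound and B's from a
-- terminating sign-alternating loop (both accidental); on a scanned 1 B's Legendre loop does
-- not terminate.
def Pre_precompute_L_table (nmax : Int) (primes : List Int) : Prop :=
  ∀ p ∈ primes.takeWhile (fun q => decide (q ≤ nmax)), 2 ≤ p
instance (nmax : Int) (primes : List Int) : Decidable (Pre_precompute_L_table nmax primes) := by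
  unfold Pre_precompute_L_table; infer_instance

def pvWitness_precompute_L_table : Int × List Int := (6, [2, 3, 5, 7])

def Spec_precompute_L_table (nmax : Int) (primes : List Int) (out : List (Int × List Int)) : Prop := out = precompute_L_table_alt nmax primes
instance (nmax : Int) (primes : List Int) (out : List (Int × List Int)) : Decidable (Spec_precompute_L_table nmax primes out) := by unfold Spec_precompute_L_table; infer_instance

-- ===== CLAIM (what is proved, stated in full; the proofs are below) =====
def Claim_equal_precompute_L_table : Prop := ∀ (nmax : Int) (primes : List Int), Dom_precompute_L_table nmax primes → Pre_precompute_L_table nmax primes → Spec_precompute_L_table nmax primes (precompute_L_table nmax primes)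

-- ===== LEMMAS AND PROOFS =====

-- the pure value both sides compute: v p m = m//p + v p (m//p)  (A's recurrence)
def pvV (p m : Int) : Int :=
  if h : 1 ≤ m ∧ 2 ≤ p then
    PySem.Int.floordiv m p + pvV p (PySem.Int.floordiv m p)
  else 0
termination_by m.toNat
decreasing_by
  have h2 : PySem.Int.floordiv m p = m / p := PySem.Int.floordiv_eq_ediv_of_pos (by omega)
  have h3 : m / p < m := Int.ediv_lt_of_lt_mul (by omega) (by nlinarith [h.1, h.2])
  have h4 : 0 ≤ m / p := Int.ediv_nonneg (by omega) (by omega)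
  simp only [h2]
  omega

-- the pure sum B computes from the running power pk
def pvLSum (m p pk : Int) : Int :=
  if h : pk ≤ m ∧ 2 ≤ p ∧ 1 ≤ pk then
    PySem.Int.floordiv m pk + pvLSum m p (pk * p)
  else 0
termination_by (m + 1 - pk).toNat
decreasing_by
  have : pk + 1 ≤ pk * p := by nlinarith [h.2.1, h.2.2]
  omega

theorem pvLegendreGo_eq (fuel : Nat) : ∀ (m p pk total : Int), 2 ≤ p → 1 ≤ pk → 0 ≤ m →
    (PySem.Int.floordiv m pk).toNat ≤ fuel →
    pvLegendreGo fuel m p pk total = total + pvLSum m p pk := by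
  induction fuel with
  | zero =>
    intro m p pk total hp hpk hm hf
    have hdiv : PySem.Int.floordiv m pk = m / pk := PySem.Int.floordiv_eq_ediv_of_pos (by omega)
    have hlt : m < pk := by
      by_contra hle
      have : 1 ≤ m / pk := Int.le_ediv_iff_mul_le (by omega) |>.mpr (by omega)
      omega
    rw [pvLSum]
    simp [pvLegendreGo, show ¬(pk ≤ m ∧ 2 ≤ p ∧ 1 ≤ pk) from by omega]
  | succ f ih =>
    intro m p pk total hp hpk hm hf
    by_cases hle : pk ≤ m
    · have hdiv : PySem.Int.floordiv m pk = m / pk := PySem.Int.floordiv_eq_ediv_of_pos (by omega)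
      have hq1 : 1 ≤ m / pk := Int.le_ediv_iff_mul_le (by omega) |>.mpr (by omega)
      have hdd : m / pk / p = m / (pk * p) := Int.ediv_ediv_of_nonneg (by omega)
      have hstep : m / (pk * p) < m / pk := by
        have : m / pk / p < m / pk := Int.ediv_lt_of_lt_mul (by omega) (by nlinarith)
        omega
      have hdiv2 : PySem.Int.floordiv m (pk * p) = m / (pk * p) :=
        PySem.Int.floordiv_eq_ediv_of_pos (by nlinarith)
      have h0 : 0 ≤ m / (pk * p) := Int.ediv_nonneg hm (by nlinarith)
      have hrec := ih m p (pk * p) (total + PySem.Int.floordiv m pk) hp (by nlinarith) hm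
        (by omega)
      conv_rhs => rw [pvLSum]
      rw [dif_pos (show pk ≤ m ∧ 2 ≤ p ∧ 1 ≤ pk from ⟨hle, hp, hpk⟩)]
      simp only [pvLegendreGo, if_pos hle, hrec]
      ring
    · conv_rhs => rw [pvLSum]
      rw [dif_neg (by omega)]
      simp [pvLegendreGo, hle]

theorem pvLSum_shift (m p pk : Int) (hp : 2 ≤ p) (hpk : 1 ≤ pk) (hm : 0 ≤ m) :
    pvLSum m p (pk * p) = pvLSum (PySem.Int.floordiv m p) p pk := by
  have hfd : PySem.Int.floordiv m p = m / p := PySem.Int.floordiv_eq_ediv_of_pos (by omega)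
  have hcond : pk * p ≤ m ↔ pk ≤ m / p := by
    rw [Int.le_ediv_iff_mul_le (by omega)]
  conv_lhs => rw [pvLSum]
  conv_rhs => rw [pvLSum]
  by_cases h : pk * p ≤ m
  · have hrec := pvLSum_shift m p (pk * p) hp (by nlinarith) hm
    have hterm : PySem.Int.floordiv m (pk * p) = PySem.Int.floordiv (m / p) pk := by
      rw [PySem.Int.floordiv_eq_ediv_of_pos (show (0:Int) < pk * p by nlinarith),
          PySem.Int.floordiv_eq_ediv_of_pos (show (0:Int) < pk by omega),
          Int.mul_comm pk p, Int.ediv_ediv_of_nonneg (show (0:Int) ≤ p by omega)]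
    rw [dif_pos (show pk * p ≤ m ∧ 2 ≤ p ∧ 1 ≤ pk * p from ⟨h, hp, by nlinarith⟩),
        dif_pos (show pk ≤ PySem.Int.floordiv m p ∧ 2 ≤ p ∧ 1 ≤ pk from
          ⟨by rw [hfd]; exact hcond.mp h, hp, hpk⟩),
        hterm, hrec, hfd]
  · rw [dif_neg (by omega),
        dif_neg (show ¬(pk ≤ PySem.Int.floordiv m p ∧ 2 ≤ p ∧ 1 ≤ pk) from by
          rw [hfd]; omega)]
termination_by (m + 1 - pk).toNat
decreasing_by
  have : pk + 1 ≤ pk * p := by nlinarith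
  omega

theorem pvV_eq_lsum (p m : Int) (hp : 2 ≤ p) (hm : 0 ≤ m) : pvV p m = pvLSum m p p := by
  conv_lhs => rw [pvV]
  conv_rhs => rw [pvLSum]
  by_cases h1 : 1 ≤ m
  · have hfd : PySem.Int.floordiv m p = m / p := PySem.Int.floordiv_eq_ediv_of_pos (by omega)
    have hq0 : 0 ≤ m / p := Int.ediv_nonneg (by omega) (by omega)
    have hqlt : m / p < m := Int.ediv_lt_of_lt_mul (by omega) (by nlinarith)
    have hrec := pvV_eq_lsum p (PySem.Int.floordiv m p) hp (by omega)
    by_cases hpm : p ≤ m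
    · rw [dif_pos ⟨h1, hp⟩, dif_pos ⟨hpm, hp, by omega⟩, hrec,
          pvLSum_shift m p p hp (by omega) (by omega), hfd]
    · have hq : m / p = 0 := by
        have : ¬ 1 ≤ m / p := by
          intro hge
          have := (Int.le_ediv_iff_mul_le (b := m) (c := p) (show (0:Int) < p by omega)).mp hge
          omega
        omega
      rw [dif_pos ⟨h1, hp⟩, dif_neg (by omega), hrec, hfd, hq]
      conv_lhs => rw [pvLSum]
      rw [dif_neg (by omega)]
      omega
  · rw [dif_neg (by omega), dif_neg (by omega)]
termination_by m.toNat
decreasing_by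
  have hfd : PySem.Int.floordiv m p = m / p := PySem.Int.floordiv_eq_ediv_of_pos (by omega)
  have hq0 : 0 ≤ m / p := Int.ediv_nonneg (by omega) (by omega)
  have hqlt : m / p < m := Int.ediv_lt_of_lt_mul (by omega) (by nlinarith)
  simp only [hfd]
  omega

theorem pvLegendre_eq_pvV (m p : Int) (hp : 2 ≤ p) (hm : 0 ≤ m) : pvLegendre m p = pvV p m := by
  have hfd : PySem.Int.floordiv m p = m / p := PySem.Int.floordiv_eq_ediv_of_pos (by omega)
  have hq0 : 0 ≤ m / p := Int.ediv_nonneg (by omega) (by omega)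
  have hle : m / p ≤ m := Int.ediv_le_self p hm
  rw [pvLegendre, pvV_eq_lsum p m hp hm,
      pvLegendreGo_eq m.toNat m p p 0 hp (by omega) hm (by omega), zero_add]

-- invariant for A's inner loop: after processing 1..k the first k cells hold pvV
theorem pvInnerA (p nmax : Int) (hp : 2 ≤ p) (hn : 0 ≤ nmax) :
    ∀ (k : Int) (hk0 : 0 ≤ k), k ≤ nmax + 1 →
    (PySem.List.pyRange 1 k 1).foldl (pvStepA p) (List.replicate (nmax + 1).toNat 0) =
      (PySem.List.pyRange 0 k 1).map (pvV p) ++ List.replicate (nmax + 1 - k).toNat 0 := by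
  intro k hk0
  induction k, hk0 using Int.le_induction with
  | base =>
    intro _
    rw [PySem.List.pyRange_one_eq_nil (by omega), PySem.List.pyRange_one_eq_nil (by omega)]
    simp
  | succ k hk' ih =>
    intro hk
    by_cases hk1 : k = 0
    · subst hk1
      rw [PySem.List.pyRange_one_eq_nil (by omega : (0:Int) + 1 ≤ 1),
          PySem.List.pyRange_one_cons (by omega : (0:Int) < 0 + 1),
          PySem.List.pyRange_one_eq_nil (by omega : (0:Int) + 1 ≤ 0 + 1)]
      have hv0 : pvV p 0 = 0 := by rw [pvV]; rw [dif_neg (by omega)]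
      have hrep : (nmax + 1).toNat = (nmax + 1 - (0 + 1)).toNat + 1 := by omega
      rw [List.foldl_nil, List.map_cons, List.map_nil, hv0, hrep, List.replicate_succ]
      rfl
    · have hk2 : 1 ≤ k := by omega
      rw [PySem.List.pyRange_one_succ_right (a := 1) (b := k) (by omega),
          PySem.List.pyRange_one_succ_right (a := 0) (b := k) (by omega),
          List.foldl_append, ih (by omega)]
      simp only [List.foldl_cons, List.foldl_nil, List.map_append, List.map_cons, List.map_nil]
      set xs := (PySem.List.pyRange 0 k 1).map (pvV p) with hxs
      have hlenxs : xs.length = k.toNat := by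
        rw [hxs, List.length_map, PySem.List.length_pyRange_one]; omega
      have hfd : PySem.Int.floordiv k p = k / p := PySem.Int.floordiv_eq_ediv_of_pos (by omega)
      have hq0 : 0 ≤ k / p := Int.ediv_nonneg (by omega) (by omega)
      have hqlt : k / p < k := Int.ediv_lt_of_lt_mul (by omega) (by nlinarith)
      unfold pvStepA
      have hget : PySem.List.pyGetD (xs ++ List.replicate (nmax + 1 - k).toNat 0)
          (PySem.Int.floordiv k p) 0 = pvV p (k / p) := by
        rw [hfd, PySem.List.pyGetD_eq_getElem _ _ (by omega)
            (by rw [List.length_append, hlenxs, List.length_replicate]; push_cast; omega)]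
        rw [List.getElem_append_left (by omega)]
        simp only [hxs, List.getElem_map, PySem.List.getElem_pyRange_one]
        congr 1
        omega
      rw [hget]
      have hval : pvV p k = PySem.Int.floordiv k p + pvV p (k / p) := by
        conv_lhs => rw [pvV]
        rw [dif_pos ⟨by omega, hp⟩, hfd]
      rw [← hval]
      have hkrep : (nmax + 1 - k).toNat = ((nmax + 1 - (k + 1)).toNat + 1) := by omega
      rw [PySem.List.pySetD_of_nonneg _ _ (by omega), hkrep, List.replicate_succ,
          List.set_append_right _ _ (by omega),
          show k.toNat - xs.length = 0 from by omega, List.set_cons_zero,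
          List.append_assoc, List.singleton_append]

-- the two outer loops agree, for any accumulated dict
theorem pvLoop_eq (nmax : Int) (ps : List Int)
    (h : ∀ p ∈ ps.takeWhile (fun q => decide (q ≤ nmax)), 2 ≤ p) :
    ∀ L, pvLoopA nmax ps L = pvLoopB nmax ps L := by
  induction ps with
  | nil => intro L; rfl
  | cons p rest ih =>
    intro L
    rw [pvLoopA, pvLoopB]
    by_cases hb : p > nmax
    · rw [if_pos hb, if_pos hb]
    · have htw : (p :: rest).takeWhile (fun q => decide (q ≤ nmax)) =
          p :: rest.takeWhile (fun q => decide (q ≤ nmax)) := by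
        simp [List.takeWhile_cons, show p ≤ nmax from by omega]
      have hp : 2 ≤ p := h p (by rw [htw]; exact List.mem_cons_self ..)
      rw [if_neg hb, if_neg hb, ih (fun q hq => h q (by rw [htw]; exact List.mem_cons_of_mem _ hq))]
      congr 2
      have hn : 0 ≤ nmax := by omega
      rw [pvInnerA p nmax hp hn (nmax + 1) (by omega) (by omega)]
      rw [show (nmax + 1 - (nmax + 1)).toNat = 0 from by omega, List.replicate_zero,
          List.append_nil]
      apply List.map_congr_left
      intro m hm
      have := (PySem.List.mem_pyRange_one.mp hm).1
      exact (pvLegendre_eq_pvV m p hp this).symm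

-- ===== VERDICT (by name: the statement is the Claim_ definition above) =====
theorem precompute_L_table_spec : Claim_equal_precompute_L_table := by
  intro nmax primes _ hpre
  unfold Pre_precompute_L_table at hpre
  unfold Spec_precompute_L_table precompute_L_table precompute_L_table_alt
  rw [pvLoop_eq nmax primes hpre]
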